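-- pv_equiv track=rewrite | github.com/FireBrother/Unified-Architecture-for-Semantic-Role-Labeling-and-Relation-Classification | test.py | change_seq_format
-- ===== SOURCE A (Python) =====
-- def change_arg_format(arg):
--     ret_arg = []
--     if len(arg) == 1:
--         arg[0][2] = 'S-' + arg[0][2]
--         ret_arg.append(arg[0])
--     if len(arg) > 1:
--         arg[0][2] = 'B-' + arg[0][2]
--         ret_arg.append(arg[0])
--         for item in arg[1:-1]:
--             item[2] = 'I-' + item[2]
--             ret_arg.append(item)
--         arg[-1][2] = 'E-' + arg[-1][2]
--         ret_arg.append(arg[-1])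
--     return ret_arg
--
-- def change_seq_format(seq):
--     pre_type = 'O'
--     ret_seq, tmp_arg = [], []
--     for item in seq:
--         type = item[2]
--         if type != 'rel' and type != 'O':
--             if pre_type == type or len(tmp_arg) == 0:
--                 tmp_arg.append(item)
--                 pre_type = type
--             else:
--                 ret_seq.extend(change_arg_format(tmp_arg))
--                 tmp_arg = [item]
--         else:
--             ret_seq.extend(change_arg_format(tmp_arg))
--             tmp_arg = []
--             ret_seq.append(item)
--         pre_type = type
--
--     if len(tmp_arg) > 0:
--         ret_seq.extend(change_arg_format(tmp_arg))
--     return ret_seq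
-- ===== SOURCE B (Python) =====
-- def change_seq_format(seq):
--     # Single local pass: each item's tag is computed from its neighbours' types
--     # instead of accumulating and flushing runs.  Mutates item[2] in place, like A.
--     types = [item[2] for item in seq]
--     prevs = ['O'] + types[:-1]
--     nexts = types[1:] + ['O']
--     ret_seq = []
--     for item, (p, nx) in zip(seq, zip(prevs, nexts)):
--         t = item[2]
--         if t == 'O' or t == 'rel':
--             ret_seq.append(item)
--         else:
--             s = p != t
--             e = nx != t
--             item[2] = ('S-' if s and e else 'B-' if s else 'E-' if e else 'I-') + t
--             ret_seq.append(item)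
--     return ret_seq
-- ===== Notes on version B (the rewrite author's own statement) =====
-- stated objective: simpler
-- what changed: Replaces the accumulate-and-flush run state machine (pre_type/tmp_arg with a helper that tags and flushes each run) by a single local pass that computes each item's B/I/E/S tag directly from its neighbours' types via zipped prev/next type lists.
import Mathlib
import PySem

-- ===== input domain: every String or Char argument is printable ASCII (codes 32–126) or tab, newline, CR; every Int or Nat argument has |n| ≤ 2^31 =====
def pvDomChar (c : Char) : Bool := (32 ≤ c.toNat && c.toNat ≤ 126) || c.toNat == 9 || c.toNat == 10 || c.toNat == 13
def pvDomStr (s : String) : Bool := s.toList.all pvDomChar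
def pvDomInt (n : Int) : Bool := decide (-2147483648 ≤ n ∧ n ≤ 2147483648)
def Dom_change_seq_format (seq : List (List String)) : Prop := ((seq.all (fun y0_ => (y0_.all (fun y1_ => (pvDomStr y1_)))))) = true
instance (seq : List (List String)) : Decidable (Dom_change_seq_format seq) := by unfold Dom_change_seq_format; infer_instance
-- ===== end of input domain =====

-- B replaces A's accumulate-and-flush run state machine by one local pass computing each
-- tag from the neighbouring items' types (zipped prev/next type lists).
-- Both Pythons mutate the items of seq in place identically; the equivalence proved here
-- is about the returned list of (updated) items.

-- ===== PORT A =====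
-- item[2] = pfx + item[2]  (exact under Pre_: every item has length ≥ 3)
def pyTag (pfx : String) (item : List String) : List String :=
  item.set 2 (pfx ++ item.getD 2 "")

def change_arg_format (arg : List (List String)) : List (List String) :=
  let ret1 : List (List String) :=
    if arg.length == 1 then [pyTag "S-" (PySem.List.pyGetD arg 0 [])] else []
  if arg.length > 1 then
    (ret1 ++ [pyTag "B-" (PySem.List.pyGetD arg 0 [])])
      ++ (PySem.List.slice arg (some 1) (some (-1))).map (pyTag "I-")
      ++ [pyTag "E-" (PySem.List.pyGetD arg (-1) [])]
  else ret1

-- A's loop body (state = pre_type, ret_seq, tmp_arg)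
def aStep (st : String × List (List String) × List (List String)) (item : List String) :
    String × List (List String) × List (List String) :=
  let pre_type := st.1
  let ret_seq := st.2.1
  let tmp_arg := st.2.2
  let t := item.getD 2 ""
  if t != "rel" && t != "O" then
    if pre_type == t || tmp_arg.length == 0 then
      (t, ret_seq, tmp_arg ++ [item])
    else
      (t, ret_seq ++ change_arg_format tmp_arg, [item])
  else
    (t, (ret_seq ++ change_arg_format tmp_arg) ++ [item], [])

def change_seq_format (seq : List (List String)) : List (List String) :=
  let st := seq.foldl aStep ("O", [], [])
  if st.2.2.length > 0 then st.2.1 ++ change_arg_format st.2.2 else st.2.1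

-- ===== PORT B =====
-- B's loop body: item with its (prev type, next type) pair
def bStep (ret_seq : List (List String)) (x : List String × String × String) :
    List (List String) :=
  let item := x.1
  let p := x.2.1
  let nx := x.2.2
  let t := item.getD 2 ""
  if t == "O" || t == "rel" then ret_seq ++ [item]
  else
    let s := p != t
    let e := nx != t
    ret_seq ++ [item.set 2 ((if s && e then "S-" else if s then "B-"
                             else if e then "E-" else "I-") ++ t)]

def change_seq_format_alt (seq : List (List String)) : List (List String) :=
  let types := seq.map (fun item => item.getD 2 "")
  let prevs := "O" :: PySem.List.slice types none (some (-1))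
  let nexts := PySem.List.slice types (some 1) none ++ ["O"]
  (seq.zip (prevs.zip nexts)).foldl bStep []

-- ===== PRECONDITION & SPEC =====
-- Pre_ excludes exactly the inputs on which Python A raises IndexError: an item with fewer than 3 fields.
def Pre_change_seq_format (seq : List (List String)) : Prop :=
  ∀ item ∈ seq, 3 ≤ item.length
instance (seq : List (List String)) : Decidable (Pre_change_seq_format seq) := by
  unfold Pre_change_seq_format; infer_instance

def pvWitness_change_seq_format : List (List String) :=
  [["a", "b", "A0"], ["c", "d", "A0"], ["e", "f", "O"], ["g", "h", "A1"]]

def Spec_change_seq_format (seq : List (List String)) (out : List (List String)) : Prop := out = change_seq_format_alt seq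
instance (seq : List (List String)) (out : List (List String)) : Decidable (Spec_change_seq_format seq out) := by unfold Spec_change_seq_format; infer_instance

-- ===== CLAIM (what is proved, stated in full; the proofs are below) =====
def Claim_equal_change_seq_format : Prop := ∀ (seq : List (List String)), Dom_change_seq_format seq → Pre_change_seq_format seq → Spec_change_seq_format seq (change_seq_format seq)

-- ===== LEMMAS AND PROOFS =====

-- type of the next item ('O' past the end), mirroring B's padded next-type list
def nextT : List (List String) → String
  | [] => "O"
  | item :: _ => item.getD 2 ""

-- does the run of type `pre` continue at the head of `seq`?
def contFlag (seq : List (List String)) (pre : String) : Bool :=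
  match seq with
  | [] => false
  | item :: _ => item.getD 2 "" == pre

-- recursive form of B's local pass, prev type threaded through
def goB (prev : String) : List (List String) → List (List String)
  | [] => []
  | item :: rest =>
    let t := item.getD 2 ""
    if t == "O" || t == "rel" then item :: goB t rest
    else
      let s := prev != t
      let e := nextT rest != t
      item.set 2 ((if s && e then "S-" else if s then "B-"
                   else if e then "E-" else "I-") ++ t) :: goB t rest

-- recursive form of A's state machine (state = pre_type, tmp_arg; flush at the end)
def aRec (pre : String) (tmp : List (List String)) : List (List String) → List (List String)
  | [] => change_arg_format tmp
  | item :: rest =>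
    let t := item.getD 2 ""
    if t != "rel" && t != "O" then
      if pre == t || tmp.length == 0 then aRec t (tmp ++ [item]) rest
      else change_arg_format tmp ++ aRec t [item] rest
    else (change_arg_format tmp ++ [item]) ++ aRec t [] rest

-- how A will eventually tag the pending run `tmp`, given whether the run continues
def midTag (tmp : List (List String)) (cont : Bool) : List (List String) :=
  if cont then
    match tmp with
    | [] => []
    | x :: r => pyTag "B-" x :: r.map (pyTag "I-")
  else change_arg_format tmp

lemma caf_nil : change_arg_format [] = [] := by decide

lemma caf_singleton (x : List String) : change_arg_format [x] = [pyTag "S-" x] := by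
  simp [change_arg_format, PySem.List.pyGetD_zero_cons]

lemma caf_cons_append (x y : List String) (r : List (List String)) :
    change_arg_format (x :: (r ++ [y]))
      = pyTag "B-" x :: (r.map (pyTag "I-") ++ [pyTag "E-" y]) := by
  have hsl : PySem.List.slice (x :: (r ++ [y])) (some 1) (some (-1)) = r := by
    simp [PySem.List.slice, PySem.List.clampIdx]
    rw [if_neg (by omega)]
    simp
  have hget0 : PySem.List.pyGetD (x :: (r ++ [y])) 0 [] = x :=
    PySem.List.pyGetD_zero_cons _ _ _
  have hlast : PySem.List.pyGetD (x :: (r ++ [y])) (-1) [] = y := by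
    have h : x :: (r ++ [y]) = (x :: r) ++ [y] := by simp
    rw [h, PySem.List.pyGetD_neg_one_append_singleton]
  simp [change_arg_format, hsl, hget0, hlast]

lemma midTag_append (tmp : List (List String)) (htmp : tmp ≠ []) (item : List String)
    (c : Bool) :
    midTag (tmp ++ [item]) c
      = midTag tmp true ++ [pyTag (if c then "I-" else "E-") item] := by
  obtain ⟨x, r, rfl⟩ : ∃ x r, tmp = x :: r := by
    cases tmp with
    | nil => exact absurd rfl htmp
    | cons x r => exact ⟨x, r, rfl⟩
  cases c with
  | true => simp [midTag]
  | false => simp [midTag, caf_cons_append]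

-- the invariant A's state satisfies
def InvA (pre : String) (tmp : List (List String)) : Prop :=
  (tmp = [] ∧ (pre = "O" ∨ pre = "rel")) ∨ (tmp ≠ [] ∧ pre ≠ "O" ∧ pre ≠ "rel")

lemma aRec_eq_goB : ∀ (seq : List (List String)) (pre : String) (tmp : List (List String)),
    InvA pre tmp →
    aRec pre tmp seq = midTag tmp (contFlag seq pre) ++ goB pre seq := by
  intro seq
  induction seq with
  | nil =>
    intro pre tmp _
    simp [aRec, goB, contFlag, midTag]
  | cons item rest ih =>
    intro pre tmp hinv
    have hcfc : ∀ p, contFlag (item :: rest) p = (item.getD 2 "" == p) := fun _ => rfl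
    have hpyTag : ∀ pfx, pyTag pfx item = item.set 2 (pfx ++ item.getD 2 "") := fun _ => rfl
    simp only [aRec, goB]
    generalize ht : item.getD 2 "" = t
    rw [ht] at hcfc hpyTag
    by_cases hOR : t = "O" ∨ t = "rel"
    · have hc : (t != "rel" && t != "O") = false := by
        rcases hOR with h | h <;> rw [h] <;> decide
      have hB : (t == "O" || t == "rel") = true := by
        rcases hOR with h | h <;> rw [h] <;> decide
      rw [hc, hB]
      simp only [Bool.false_eq_true, if_false, if_true]
      rw [ih t [] (Or.inl ⟨rfl, hOR⟩)]
      have hmid : midTag tmp (contFlag (item :: rest) pre) = change_arg_format tmp := by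
        rcases hinv with ⟨rfl, _⟩ | ⟨htmp, hpre1, hpre2⟩
        · cases contFlag (item :: rest) pre <;> simp [midTag, caf_nil]
        · rw [hcfc pre]
          have hf : (t == pre) = false := by
            apply beq_eq_false_iff_ne.mpr
            intro h
            rcases hOR with h2 | h2 <;> rw [h2] at h
            · exact hpre1 h.symm
            · exact hpre2 h.symm
          rw [hf]; simp [midTag]
      rw [hmid]
      cases contFlag rest t <;> simp [midTag, caf_nil]
    · obtain ⟨hO, hR⟩ := not_or.mp hOR
      have hc : (t != "rel" && t != "O") = true := by simp [hO, hR]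
      have hB : (t == "O" || t == "rel") = false := by simp [hO, hR]
      rw [hc, hB]
      simp only [if_true, Bool.false_eq_true, if_false]
      have hend : (nextT rest != t) = !contFlag rest t := by
        cases rest with
        | nil =>
          have h1 : nextT ([] : List (List String)) = "O" := rfl
          have h2 : contFlag ([] : List (List String)) t = false := rfl
          rw [h1, h2]
          simp [bne_iff_ne]
          exact Ne.symm hO
        | cons r rest' => rfl
      by_cases hpt : pre = t
      · rcases hinv with ⟨rfl, hORp⟩ | ⟨htmp, hpre1, hpre2⟩
        · exact absurd (by rw [← hpt]; exact hORp) hOR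
        · have hcond : (pre == t || tmp.length == 0) = true := by simp [hpt]
          rw [hcond]
          simp only [if_true]
          rw [ih t (tmp ++ [item]) (Or.inr ⟨by simp, hO, hR⟩)]
          rw [hcfc pre]
          have hTpre : (t == pre) = true := by simp [hpt.symm]
          rw [hTpre]
          have hs : (pre != t) = false := by simp [hpt]
          rw [hs]
          simp only [Bool.false_and, Bool.false_eq_true, if_false]
          rw [midTag_append tmp htmp item (contFlag rest t), hend]
          cases contFlag rest t <;> simp [hpyTag, List.append_assoc]
      · have hs : (pre != t) = true := by simp [hpt]
        have hcfp : contFlag (item :: rest) pre = false := by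
          rw [hcfc pre]
          exact beq_eq_false_iff_ne.mpr (fun h => hpt h.symm)
        rw [hs, hcfp]
        simp only [Bool.true_and]
        have hmid1 : midTag [item] (contFlag rest t)
            = [item.set 2 ((if (nextT rest != t) = true then "S-" else "B-") ++ t)] := by
          rw [hend]
          cases contFlag rest t <;>
            simp [midTag, caf_singleton, hpyTag]
        rcases hinv with ⟨rfl, _⟩ | ⟨htmp, _, _⟩
        · have hcond : (pre == t || ([] : List (List String)).length == 0) = true := by simp
          rw [hcond]
          simp only [if_true]
          rw [show ([] : List (List String)) ++ [item] = [item] from rfl]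
          rw [ih t [item] (Or.inr ⟨by simp, hO, hR⟩), hmid1]
          cases (nextT rest != t) <;> simp [midTag, caf_nil]
        · have hcond : (pre == t || tmp.length == 0) = false := by
            simp [hpt, List.length_eq_zero_iff, htmp]
          rw [hcond]
          simp only [Bool.false_eq_true, if_false]
          rw [ih t [item] (Or.inr ⟨by simp, hO, hR⟩), hmid1]
          cases (nextT rest != t) <;> simp [midTag]

-- A's foldl equals aRec
lemma A_fold : ∀ (seq : List (List String)) (pre : String)
    (acc tmp : List (List String)),
    (let st := seq.foldl aStep (pre, acc, tmp);
     if st.2.2.length > 0 then st.2.1 ++ change_arg_format st.2.2 else st.2.1)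
    = acc ++ aRec pre tmp seq := by
  intro seq
  induction seq with
  | nil =>
    intro pre acc tmp
    simp only [List.foldl_nil, aRec]
    cases tmp with
    | nil => simp [caf_nil]
    | cons x r => simp
  | cons item rest ih =>
    intro pre acc tmp
    simp only [List.foldl_cons, aRec, aStep]
    by_cases h1 : (item.getD 2 "" != "rel" && item.getD 2 "" != "O") = true
    · rw [if_pos h1, if_pos h1]
      by_cases h2 : (pre == item.getD 2 "" || tmp.length == 0) = true
      · rw [if_pos h2, if_pos h2]
        exact ih _ _ _
      · rw [if_neg h2, if_neg h2]
        rw [ih _ _ _]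
        simp [List.append_assoc]
    · rw [if_neg h1, if_neg h1]
      rw [ih _ _ _]
      simp [List.append_assoc]

-- B's foldl equals goB (after the slices become dropLast/tail)
lemma B_fold : ∀ (seq : List (List String)) (prev : String) (acc : List (List String)),
    (seq.zip ((prev :: (seq.map (fun item => item.getD 2 "")).dropLast).zip
        ((seq.map (fun item => item.getD 2 "")).tail ++ ["O"]))).foldl bStep acc
    = acc ++ goB prev seq := by
  intro seq
  induction seq with
  | nil => intro prev acc; simp [goB]
  | cons item rest ih =>
    intro prev acc
    cases rest with
    | nil =>
      simp only [List.map, List.dropLast_singleton, List.tail, List.zip, List.zipWith,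
        List.foldl_cons, List.foldl_nil, goB, bStep, List.nil_append]
      have hnx : nextT ([] : List (List String)) = "O" := rfl
      rw [hnx]
      by_cases h : (item.getD 2 "" == "O" || item.getD 2 "" == "rel") = true
      · rw [if_pos h, if_pos h]
      · rw [if_neg h, if_neg h]
    | cons r rest' =>
      have hzip :
          ((item :: r :: rest').zip
            ((prev :: ((item :: r :: rest').map (fun it => it.getD 2 "")).dropLast).zip
              (((item :: r :: rest').map (fun it => it.getD 2 "")).tail ++ ["O"])))
          = (item, prev, r.getD 2 "") ::
            ((r :: rest').zip
              ((item.getD 2 "" :: ((r :: rest').map (fun it => it.getD 2 "")).dropLast).zip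
                (((r :: rest').map (fun it => it.getD 2 "")).tail ++ ["O"]))) := by
        simp [List.zip]
      rw [hzip, List.foldl_cons, ih]
      have hnx : nextT (r :: rest') = r.getD 2 "" := rfl
      simp only [goB, hnx, bStep]
      by_cases h : (item.getD 2 "" == "O" || item.getD 2 "" == "rel") = true
      · rw [if_pos h, if_pos h]; simp
      · rw [if_neg h, if_neg h]; simp

-- ===== VERDICT (by name: the statement is the Claim_ definition above) =====
theorem change_seq_format_spec : Claim_equal_change_seq_format := by
  intro seq _ _
  unfold Spec_change_seq_format
  have hA : change_seq_format seq = aRec "O" [] seq := by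
    have := A_fold seq "O" [] []
    simpa [change_seq_format] using this
  have hB : change_seq_format_alt seq = goB "O" seq := by
    have := B_fold seq "O" []
    simpa [change_seq_format_alt, PySem.List.slice_to_neg_one,
      PySem.List.slice_from_one] using this
  rw [hA, hB, aRec_eq_goB seq "O" [] (Or.inl ⟨rfl, Or.inl rfl⟩)]
  cases h : contFlag seq "O" <;> simp [midTag, caf_nil]
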